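-- pv_equiv track=rewrite | github.com/ArtemiiV/POMS | function.py | encode_text_to_binary
-- ===== SOURCE A (Python) =====
-- def encode_text_to_binary(text):
--     mas = []
--     for i in text:
--         if i != " ":
--             mas.append(ord(i))
--
--     code = []
--     for j in mas:
--         binary_representation = str(bin(j))
--         for i in range(2, len(binary_representation)):
--             code.append(int(binary_representation[i]))
--
--     return code
-- ===== SOURCE B (Python) =====
-- def encode_text_to_binary(text):
--     code = []
--     for c in text:
--         if c != " ":
--             n = ord(c)
--             code.extend((n >> k) & 1 for k in range(n.bit_length() - 1, -1, -1))
--     return code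
-- ===== Notes on version B (the rewrite author's own statement) =====
-- stated objective: alternative
-- what changed: Single pass over the text that emits each code point's bits by shift-and-mask arithmetic, instead of building an intermediate ord list and then formatting, slicing and re-parsing bin() strings per character.
import Mathlib
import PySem

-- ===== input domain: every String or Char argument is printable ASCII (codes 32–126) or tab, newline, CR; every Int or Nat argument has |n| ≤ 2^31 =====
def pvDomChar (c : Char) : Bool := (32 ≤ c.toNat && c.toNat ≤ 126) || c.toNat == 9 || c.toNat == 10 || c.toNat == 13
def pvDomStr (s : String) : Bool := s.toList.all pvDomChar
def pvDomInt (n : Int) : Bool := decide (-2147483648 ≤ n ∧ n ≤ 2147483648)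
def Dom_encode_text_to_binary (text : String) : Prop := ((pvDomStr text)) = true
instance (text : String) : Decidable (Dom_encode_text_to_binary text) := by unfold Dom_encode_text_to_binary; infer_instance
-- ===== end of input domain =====

-- B replaces A's bin()-string formatting/slicing/re-parsing per character by one pass emitting
-- bits with shift-and-mask arithmetic (same cost; return-value equivalence is what is proved).


-- ===== PORT A =====
-- int(binary_representation[i]) on a digit char; exact since bin()'s digits are '0'/'1'
def pyDigitInt (c : Char) : Int := (PySem.Int.ofChars? [c]).getD 0

def encode_text_to_binary (text : String) : List Int :=
  -- mas = []; for i in text: if i != " ": mas.append(ord(i))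
  let mas : List Int := text.toList.foldl (fun mas i => if i ≠ ' ' then mas ++ [(i.toNat : Int)] else mas) []
  -- code = []; for j in mas: s = str(bin(j)); for i in range(2, len(s)): code.append(int(s[i]))
  mas.foldl (fun code j =>
    let binary_representation := (PySem.Int.pyBin j).toList
    code ++ (binary_representation.drop 2).map pyDigitInt) []

-- ===== PORT B =====
def encode_text_to_binary_alt (text : String) : List Int :=
  text.toList.foldl (fun code c =>
    if c ≠ ' ' then
      let n : Int := (c.toNat : Int)
      code ++ (List.range (PySem.Int.bitLength n)).reverse.map (fun (k : Nat) => PySem.Int.band (n >>> k) 1)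
    else code) []

-- ===== PRECONDITION & SPEC =====
def Spec_encode_text_to_binary (text : String) (out : List Int) : Prop := out = encode_text_to_binary_alt text
instance (text : String) (out : List Int) : Decidable (Spec_encode_text_to_binary text out) := by unfold Spec_encode_text_to_binary; infer_instance

-- ===== CLAIM (what is proved, stated in full; the proofs are below) =====
def Claim_equal_encode_text_to_binary : Prop := ∀ (text : String), Dom_encode_text_to_binary text → Spec_encode_text_to_binary text (encode_text_to_binary text)

-- ===== LEMMAS AND PROOFS =====

-- canonical digit list (MSB first) of a positive Nat
def pvDig (m : Nat) : List Int :=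
  if h : m < 2 then [(m % 2 : Nat)] else pvDig (m / 2) ++ [((m % 2 : Nat) : Int)]
decreasing_by exact Nat.div_lt_self (by omega) (by omega)

-- toDigitsCore characterised (binChars mirrors its structure)
def pvBinChars (m : Nat) : List Char :=
  if h : m < 2 then [(m % 2).digitChar] else pvBinChars (m / 2) ++ [(m % 2).digitChar]
decreasing_by exact Nat.div_lt_self (by omega) (by omega)

lemma toDigitsCore_eq (fuel : Nat) : ∀ (m : Nat) (ds : List Char), m < fuel →
    Nat.toDigitsCore 2 fuel m ds = pvBinChars m ++ ds := by
  induction fuel with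
  | zero => intro m ds h; omega
  | succ f ih =>
    intro m ds h
    rw [Nat.toDigitsCore]
    by_cases h2 : m / 2 = 0
    · simp only [h2, if_pos]
      conv_rhs => rw [pvBinChars]
      simp [show m < 2 by omega]
    · simp only [if_neg h2]
      rw [ih (m / 2) _ (by omega)]
      conv_rhs => rw [pvBinChars]
      rw [dif_neg (show ¬ m < 2 by omega), List.append_assoc]
      rfl

lemma map_pvBinChars (m : Nat) : (pvBinChars m).map pyDigitInt = pvDig m := by
  induction m using Nat.strong_induction_on with
  | _ m ih =>
    rw [pvBinChars, pvDig]
    by_cases h : m < 2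
    · simp only [h, dif_pos, List.map_cons, List.map_nil]
      interval_cases m <;> decide
    · simp only [h, dif_neg, not_false_iff, List.map_append, List.map_cons, List.map_nil]
      rw [ih (m / 2) (Nat.div_lt_self (by omega) (by omega))]
      have : m % 2 < 2 := Nat.mod_lt _ (by omega)
      interval_cases h2 : m % 2 <;> simp [pyDigitInt] <;> decide

-- A's per-character digits, for positive code points
lemma fA_eq (m : Nat) (hm : 0 < m) :
    (((PySem.Int.pyBin (m : Int)).toList.drop 2).map pyDigitInt) = pvDig m := by
  rw [PySem.Int.toList_pyBin]
  unfold PySem.Int.toBinChars0b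
  rw [if_neg (show ¬ ((m : Int) < 0) by omega)]
  simp only [Int.toNat_natCast]
  rw [Nat.toDigits, toDigitsCore_eq (m + 1) m [] (by omega)]
  simp [map_pvBinChars]

-- B's per-character digits, for positive code points
lemma fB_eq (m : Nat) (hm : 0 < m) :
    (List.range (PySem.Int.bitLength (m : Int))).reverse.map
      (fun (k : Nat) => PySem.Int.band ((m : Int) >>> k) 1) = pvDig m := by
  induction m using Nat.strong_induction_on with
  | _ m ih =>
    rw [PySem.Int.bitLength_natCast hm, List.range_succ_eq_map]
    simp only [List.reverse_cons, List.map_append, List.map_map, List.map_reverse]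
    rw [pvDig]
    by_cases h : m < 2
    · have h1 : m = 1 := by omega
      subst h1
      decide
    · have hdiv : 0 < m / 2 := by omega
      rw [dif_neg h]
      congr 1
      · rw [← ih (m / 2) (Nat.div_lt_self (by omega) (by omega)) hdiv, List.map_reverse]
        congr 1
        apply List.map_congr_left
        intro k _
        simp only [Function.comp_apply]
        congr 1
        rw [← Int.natCast_shiftRight, ← Int.natCast_shiftRight, Nat.shiftRight_succ_inside]
      · simp only [List.map_cons, List.map_nil, ← Int.natCast_shiftRight,
          Nat.shiftRight_zero, PySem.Int.band_one]
        rw [show (2 : Int) = ((2 : Nat) : Int) from rfl, PySem.Int.mod_natCast]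

lemma flatMap_filter_map (cs : List Char) (h : ∀ c ∈ cs, 0 < c.toNat) :
    (((cs.filter (fun i => i ≠ ' ')).map (fun i => ((i.toNat : Nat) : Int))).flatMap
        (fun j => ((PySem.Int.pyBin j).toList.drop 2).map pyDigitInt))
      = cs.flatMap (fun c =>
          if c ≠ ' ' then
            (List.range (PySem.Int.bitLength ((c.toNat : Nat) : Int))).reverse.map
              (fun (k : Nat) => PySem.Int.band ((((c.toNat : Nat) : Int)) >>> k) 1)
          else []) := by
  induction cs with
  | nil => rfl
  | cons c cs ih =>
    have hc : 0 < c.toNat := h c (List.mem_cons_self)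
    have ihh := ih (fun x hx => h x (List.mem_cons_of_mem _ hx))
    by_cases hsp : c = ' '
    · subst hsp
      rw [List.filter_cons_of_neg (by simp), List.flatMap_cons, if_neg (by simp),
        List.nil_append]
      exact ihh
    · rw [List.filter_cons_of_pos (by simp [hsp]), List.map_cons, List.flatMap_cons,
        List.flatMap_cons, if_pos hsp, fA_eq c.toNat hc, fB_eq c.toNat hc, ihh]

theorem encode_text_to_binary_spec : Claim_equal_encode_text_to_binary := by
  intro text hdom
  have hpos : ∀ c ∈ text.toList, 0 < c.toNat := by
    intro c hc
    have h1 := List.all_eq_true.mp hdom c hc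
    simp only [pvDomChar, Bool.or_eq_true, Bool.and_eq_true, decide_eq_true_eq,
      beq_iff_eq] at h1
    omega
  show encode_text_to_binary text = encode_text_to_binary_alt text
  unfold encode_text_to_binary encode_text_to_binary_alt
  have hB : (fun (code : List Int) (c : Char) =>
      if c ≠ ' ' then
        code ++ (List.range (PySem.Int.bitLength ((c.toNat : Nat) : Int))).reverse.map
          (fun (k : Nat) => PySem.Int.band ((((c.toNat : Nat) : Int)) >>> k) 1)
      else code)
      = (fun (code : List Int) (c : Char) => code ++
          (if c ≠ ' ' then
            (List.range (PySem.Int.bitLength ((c.toNat : Nat) : Int))).reverse.map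
              (fun (k : Nat) => PySem.Int.band ((((c.toNat : Nat) : Int)) >>> k) 1)
          else [])) := by
    funext code c; split <;> simp
  have hA : (fun (mas : List Int) (i : Char) => if i ≠ ' ' then mas ++ [((i.toNat : Nat) : Int)] else mas)
      = (fun (mas : List Int) (i : Char) =>
          if (fun i => decide (i ≠ ' ')) i = true then mas ++ [((i.toNat : Nat) : Int)] else mas) := by
    funext mas i; simp
  simp only [hA, PySem.List.foldl_append_if, PySem.List.foldl_append_eq_flatMap, hB,
    List.nil_append]
  exact flatMap_filter_map text.toList hpos
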